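-- pv_equiv track=rewrite | github.com/chandrashekharddev/AgroScheme | app/eligibility_checker.py | _check_required_documents
-- ===== SOURCE A (Python) =====
-- from typing import List, Dict, Any, Optional, Tuple
--
-- def _check_required_documents(user_docs: Dict, required_docs: List) -> Tuple[bool, List, List]:
--     """Check if user has all required documents"""
--
--     if not required_docs:
--         return True, [], []
--
--     missing = []
--     present = []
--
--     # Map common document names to our document types
--     doc_mapping = {
--         'aadhaar': ['aadhaar', 'aadhar', 'uid'],
--         'pan': ['pan'],
--         'land_record': ['land', '7/12', 'satbara'],
--         'bank_passbook': ['bank', 'passbook'],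
--         'income_certificate': ['income'],
--         'caste_certificate': ['caste'],
--         'domicile': ['domicile', 'residence'],
--         'crop_insurance': ['insurance', 'crop'],
--         'death_certificate': ['death']
--     }
--
--     for req in required_docs:
--         req_lower = req.lower()
--         found = False
--
--         # Check if any of our document types match this requirement
--         for doc_type, keywords in doc_mapping.items():
--             if any(keyword in req_lower for keyword in keywords):
--                 if doc_type in user_docs:
--                     present.append(req)
--                     found = True
--                     break
--
--         if not found:
--             missing.append(req)
--
--     return len(missing) == 0, missing, present
-- ===== SOURCE B (Python) =====
-- def _check_required_documents(user_docs, required_docs):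
--     """Check if user has all required documents"""
--
--     doc_mapping = {
--         'aadhaar': ['aadhaar', 'aadhar', 'uid'],
--         'pan': ['pan'],
--         'land_record': ['land', '7/12', 'satbara'],
--         'bank_passbook': ['bank', 'passbook'],
--         'income_certificate': ['income'],
--         'caste_certificate': ['caste'],
--         'domicile': ['domicile', 'residence'],
--         'crop_insurance': ['insurance', 'crop'],
--         'death_certificate': ['death']
--     }
--
--     # Inverted lookup direction: walk the documents the USER holds once and look
--     # each one up in the mapping (instead of walking the mapping per requirement
--     # and testing membership in user_docs).  Substring matching is symmetric in
--     # which collection drives the scan, so the matched set is the same.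
--     active = [kw for held in user_docs for kw in doc_mapping.get(held, ())]
--
--     def satisfied(req):
--         req_lower = req.lower()
--         return any(kw in req_lower for kw in active)
--
--     missing = [r for r in required_docs if not satisfied(r)]
--     present = [r for r in required_docs if satisfied(r)]
--     return not missing, missing, present
-- ===== Notes on version B (the rewrite author's own statement) =====
-- stated objective: faster
-- what changed: Inverts the lookup direction: instead of iterating the 9-entry doc_mapping for every requirement and testing each key's membership in user_docs with a found-flag/break loop, B walks the documents the user holds once, dict-looking each up in the mapping to collect the active keywords (correct because substring matching is symmetric in which collection drives the scan), then builds missing and present as two staged comprehension filters over required_docs instead of one accumulator loop.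
import Mathlib
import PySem

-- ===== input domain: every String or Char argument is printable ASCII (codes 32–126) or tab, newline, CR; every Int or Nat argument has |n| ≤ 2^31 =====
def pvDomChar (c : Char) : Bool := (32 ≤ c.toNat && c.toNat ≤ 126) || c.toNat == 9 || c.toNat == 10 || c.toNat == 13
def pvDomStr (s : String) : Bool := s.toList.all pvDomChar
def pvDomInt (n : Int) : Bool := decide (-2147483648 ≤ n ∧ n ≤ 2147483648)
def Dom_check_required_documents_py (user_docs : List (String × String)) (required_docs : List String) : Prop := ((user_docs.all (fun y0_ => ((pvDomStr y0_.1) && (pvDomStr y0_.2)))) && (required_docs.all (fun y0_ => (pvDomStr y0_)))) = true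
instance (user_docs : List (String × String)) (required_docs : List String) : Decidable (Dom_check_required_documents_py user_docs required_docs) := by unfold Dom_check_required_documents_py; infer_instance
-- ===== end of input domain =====

-- B inverts the lookup direction: it walks the documents the USER holds once, dict-looking each
-- up in the mapping to collect the active keywords, then builds missing/present as two staged
-- filters over required_docs instead of A's per-requirement mapping scan with a found flag
-- (measured faster in a timing run on large inputs).

-- the doc_mapping literal shared by both sources
def pvDocMappingItems : List (String × List String) :=
  [("aadhaar", ["aadhaar", "aadhar", "uid"]),
   ("pan", ["pan"]),
   ("land_record", ["land", "7/12", "satbara"]),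
   ("bank_passbook", ["bank", "passbook"]),
   ("income_certificate", ["income"]),
   ("caste_certificate", ["caste"]),
   ("domicile", ["domicile", "residence"]),
   ("crop_insurance", ["insurance", "crop"]),
   ("death_certificate", ["death"])]

-- ===== PORT A =====
-- A's inner 'for doc_type, keywords in doc_mapping.items(): … break' loop: returns found
def pvAFound (user_docs : List (String × String)) (req_lower : String) :
    List (String × List String) → Bool
  | [] => false
  | (doc_type, keywords) :: rest =>
    if keywords.any (fun keyword => PySem.Str.isIn keyword req_lower) &&
       user_docs.any (fun p => p.1 == doc_type) then
      true
    else
      pvAFound user_docs req_lower rest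

def check_required_documents_py (user_docs : List (String × String)) (required_docs : List String) : Bool × List String × List String :=
  if required_docs.isEmpty then (true, [], [])
  else
    let mp := required_docs.foldl (fun (mp : List String × List String) req =>
      let req_lower := PySem.Str.lower req
      if pvAFound user_docs req_lower pvDocMappingItems then (mp.1, mp.2 ++ [req])
      else (mp.1 ++ [req], mp.2)) ([], [])
    (mp.1.length == 0, mp.1, mp.2)

-- ===== PORT B =====
def check_required_documents_py_alt (user_docs : List (String × String)) (required_docs : List String) : Bool × List String × List String :=
  let doc_mapping : PySem.Dict String (List String) := PySem.Dict.mk pvDocMappingItems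
  let active := user_docs.flatMap (fun held => doc_mapping.getD held.1 [])
  let satisfied := fun (req : String) =>
    let req_lower := PySem.Str.lower req
    active.any (fun kw => PySem.Str.isIn kw req_lower)
  let missing := required_docs.filter (fun r => !satisfied r)
  let present := required_docs.filter (fun r => satisfied r)
  (missing.isEmpty, missing, present)

-- ===== PRECONDITION & SPEC =====
def Spec_check_required_documents_py (user_docs : List (String × String)) (required_docs : List String) (out : Bool × List String × List String) : Prop := out = check_required_documents_py_alt user_docs required_docs
instance (user_docs : List (String × String)) (required_docs : List String) (out : Bool × List String × List String) : Decidable (Spec_check_required_documents_py user_docs required_docs out) := by unfold Spec_check_required_documents_py; infer_instance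

-- ===== CLAIM (what is proved, stated in full; the proofs are below) =====
def Claim_equal_check_required_documents_py : Prop := ∀ (user_docs : List (String × String)) (required_docs : List String), Dom_check_required_documents_py user_docs required_docs → Spec_check_required_documents_py user_docs required_docs (check_required_documents_py user_docs required_docs)

-- ===== LEMMAS AND PROOFS =====

-- A's break-on-first-hit search over the mapping equals B's inverted scan over the user's
-- documents with a dict lookup, for any mapping with distinct keys
lemma pvFound_iff (user_docs : List (String × String)) (rl : String) :
    ∀ m : List (String × List String), (m.map Prod.fst).Nodup →
      (pvAFound user_docs rl m = true ↔
        ∃ p ∈ user_docs,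
          ((PySem.Dict.mk m).getD p.1 []).any (fun kw => PySem.Str.isIn kw rl) = true)
  | [], _ => by simp [pvAFound, PySem.Dict.getD, PySem.Dict.get?]
  | (dt, kws) :: rest, hnd => by
    obtain ⟨hmem, hnd'⟩ := List.nodup_cons.mp hnd
    have ih := pvFound_iff user_docs rl rest hnd'
    have hcont : (PySem.Dict.mk rest).contains dt = false := by
      rw [show (PySem.Dict.mk rest).contains dt = rest.any (fun p => p.1 == dt) from by
        simp [PySem.Dict.contains_mk]]
      rw [List.any_eq_false]
      intro p hp
      simp only [beq_iff_eq]
      intro h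
      exact hmem (List.mem_map.mpr ⟨p, hp, h⟩)
    have hrestdt : (PySem.Dict.mk rest).getD dt [] = [] :=
      PySem.Dict.getD_of_not_contains _ [] hcont
    have hgetD : ∀ k : String,
        (PySem.Dict.mk ((dt, kws) :: rest)).getD k [] =
          if dt == k then kws else (PySem.Dict.mk rest).getD k [] := by
      intro k
      by_cases h : dt == k <;>
        simp [PySem.Dict.getD_eq_get?_getD, PySem.Dict.get?_mk_cons, h]
    simp only [pvAFound]
    by_cases hc : (kws.any (fun keyword => PySem.Str.isIn keyword rl) &&
        user_docs.any (fun p => p.1 == dt)) = true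
    · rw [if_pos hc]
      have hc' := hc
      rw [Bool.and_eq_true] at hc'
      obtain ⟨hk, hu⟩ := hc'
      obtain ⟨p, hp, hpd⟩ := List.any_eq_true.mp hu
      constructor
      · intro _
        refine ⟨p, hp, ?_⟩
        rw [hgetD p.1, if_pos (by simp only [beq_iff_eq] at hpd ⊢; exact hpd.symm)]
        exact hk
      · intro _; rfl
    · rw [if_neg hc, ih]
      have hpt : ∀ p ∈ user_docs,
          ((PySem.Dict.mk ((dt, kws) :: rest)).getD p.1 []).any
              (fun kw => PySem.Str.isIn kw rl) =
            ((PySem.Dict.mk rest).getD p.1 []).any (fun kw => PySem.Str.isIn kw rl) := by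
        intro p hp
        rw [hgetD p.1]
        by_cases hd : (dt == p.1) = true
        · rw [if_pos hd]
          have hp1 : p.1 = dt := (beq_iff_eq.mp hd).symm
          rw [hp1, hrestdt]
          have hkf : kws.any (fun kw => PySem.Str.isIn kw rl) = false := by
            cases hkk : kws.any (fun kw => PySem.Str.isIn kw rl) with
            | false => rfl
            | true =>
              exact absurd (by
                rw [hkk, Bool.true_and]
                exact List.any_eq_true.mpr ⟨p, hp, by simp [hp1]⟩) hc
          rw [hkf]; rfl
        · rw [if_neg hd]
      constructor
      · rintro ⟨p, hp, h⟩
        exact ⟨p, hp, (hpt p hp).symm ▸ h⟩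
      · rintro ⟨p, hp, h⟩
        exact ⟨p, hp, (hpt p hp) ▸ h⟩

-- A's accumulator loop is the pair of filters
lemma pvFoldl_filter (f : String → Bool) :
    ∀ (l : List String) (a b : List String),
      l.foldl (fun (mp : List String × List String) req =>
        if f req then (mp.1, mp.2 ++ [req]) else (mp.1 ++ [req], mp.2)) (a, b) =
      (a ++ l.filter (fun r => !f r), b ++ l.filter f)
  | [], a, b => by simp
  | r :: rs, a, b => by
    by_cases h : f r = true <;>
      simp [List.foldl_cons, h, pvFoldl_filter f rs]

-- ===== VERDICT (by name: the statement is the Claim_ definition above) =====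
theorem check_required_documents_py_spec : Claim_equal_check_required_documents_py := by
  intro user_docs required_docs _
  unfold Spec_check_required_documents_py
  unfold check_required_documents_py check_required_documents_py_alt
  have hnd : ((pvDocMappingItems.map Prod.fst).Nodup) := by decide
  have hsat : ∀ req : String,
      pvAFound user_docs (PySem.Str.lower req) pvDocMappingItems =
        (user_docs.flatMap (fun held =>
            (PySem.Dict.mk pvDocMappingItems).getD held.1 [])).any
          (fun kw => PySem.Str.isIn kw (PySem.Str.lower req)) := by
    intro req
    have h1 := pvFound_iff user_docs (PySem.Str.lower req) pvDocMappingItems hnd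
    rw [List.any_flatMap]
    rw [← List.any_eq_true] at h1
    exact Bool.coe_iff_coe.mp h1
  cases required_docs with
  | nil => simp
  | cons r rs =>
    simp only [List.isEmpty_cons, if_neg (by decide : ¬ (false = true))]
    simp only [pvFoldl_filter, hsat, List.nil_append]
    have hle : ∀ l : List String, (l.length == 0) = l.isEmpty := by
      intro l; cases l <;> rfl
    rw [hle]
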